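-- pv_equiv track=rewrite | github.com/OTOYO1020/ChatDev_Intermediate | WareHouse/129_B_1_DefaultOrganization_20250427025942/main.py | calculate_min_difference
-- ===== SOURCE A (Python) =====
-- def calculate_min_difference(weights):
--     """
--     Calculate the minimum absolute difference between the sums of two groups of weights.
--     Args:
--     weights (list): List of weights indexed from 1 to N (0-indexed in implementation).
--     Returns:
--     int: Minimum absolute difference between the two groups.
--     """
--     total_sum = sum(weights)
--     min_difference = float('inf')
--     s1 = 0  # Initialize S_1 to 0
--     # Loop from 1 to N-1 (1-indexed)
--     for t in range(1, len(weights)):  # t corresponds to the division point (1-indexed)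
--         s1 += weights[t - 1]  # Access the weight using 0-indexing
--         s2 = total_sum - s1  # Calculate S_2 based on the total sum
--         difference = abs(s1 - s2)
--         if difference < min_difference:
--             min_difference = difference
--     return min_difference
-- ===== SOURCE B (Python) =====
-- def calculate_min_difference(weights):
--     """Sort the doubled split-point prefix sums 2*s1 and binary-search for the
--     value closest to the total; answer = the smaller adjacent gap |total - 2*s1|."""
--     if len(weights) < 2:
--         return float('inf')
--     total = sum(weights)
--     doubled = []
--     s = 0
--     for w in weights[:-1]:
--         s += w
--         doubled.append(2 * s)
--     doubled.sort()
--     # leftmost index with doubled[lo] >= total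
--     lo, hi = 0, len(doubled)
--     while lo < hi:
--         mid = (lo + hi) // 2
--         if doubled[mid] < total:
--             lo = mid + 1
--         else:
--             hi = mid
--     candidates = []
--     if lo < len(doubled):
--         candidates.append(doubled[lo] - total)
--     if lo > 0:
--         candidates.append(total - doubled[lo - 1])
--     return min(candidates)
-- ===== Notes on version B (the rewrite author's own statement) =====
-- stated objective: alternative
-- what changed: Replaces A's single fused accumulate-and-track-min loop with a sort-and-binary-search algorithm: sort the doubled interior prefix sums 2*s1 and binary-search for the one closest to the total, using |s1-s2| = |total - 2*s1|.
-- outside the precondition, e.g. on calculate_min_difference([]): A returns inf, B returns inf; on calculate_min_difference([5]): A returns inf, B returns inf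
import Mathlib
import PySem

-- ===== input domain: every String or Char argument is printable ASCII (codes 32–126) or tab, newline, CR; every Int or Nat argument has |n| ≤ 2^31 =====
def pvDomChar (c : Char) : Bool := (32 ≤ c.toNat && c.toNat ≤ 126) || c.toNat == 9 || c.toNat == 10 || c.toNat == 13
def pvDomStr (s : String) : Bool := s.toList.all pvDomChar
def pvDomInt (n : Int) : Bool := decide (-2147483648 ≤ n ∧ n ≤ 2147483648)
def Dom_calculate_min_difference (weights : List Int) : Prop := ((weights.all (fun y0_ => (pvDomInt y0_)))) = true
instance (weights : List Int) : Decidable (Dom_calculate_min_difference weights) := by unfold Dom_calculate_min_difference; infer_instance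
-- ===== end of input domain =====

-- B replaces A's fused accumulate-and-track-min loop with a different algorithm:
-- sort the doubled interior prefix sums 2*s1 and binary-search for the value
-- closest to the total (using |s1 - s2| = |total - 2*s1|); same return value.

-- ===== PORT A =====
def calculate_min_difference (weights : List Int) : Int :=
  let total := weights.sum
  let r := (PySem.List.pyRange 1 (weights.length : Int) 1).foldl
    (fun (st : Int × Option Int) t =>
      let s1 := st.1 + PySem.List.pyGetD weights (t - 1) 0   -- index t-1 is always in range here
      let s2 := total - s1
      let difference := |s1 - s2|
      match st.2 with
      | none => (s1, some difference)
      | some m => if difference < m then (s1, some difference) else (s1, some m))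
    (0, none)
  match r.2 with
  | some v => v
  | none => 0  -- Python returns float('inf') here (len < 2): not an Int; excluded by Pre_

-- ===== PORT B =====
-- the hand-written binary search loop of Source B (leftmost index with d[lo] >= t), step for step
def pvBS (d : List Int) (t : Int) (lo hi : Nat) : Nat :=
  if lo < hi then
    let mid := (lo + hi) / 2
    if d.getD mid 0 < t then pvBS d t (mid + 1) hi else pvBS d t lo mid
  else lo
termination_by hi - lo
decreasing_by all_goals omega

def calculate_min_difference_alt (weights : List Int) : Int :=
  if weights.length < 2 then 0  -- Python returns float('inf'): not an Int; excluded by Pre_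
  else
    let total := weights.sum
    let st := (PySem.List.slice weights none (some (-1))).foldl
      (fun (acc : Int × List Int) w => (acc.1 + w, acc.2 ++ [2 * (acc.1 + w)])) (0, [])
    let doubled := PySem.List.sorted st.2 (fun x => x)
    let lo := pvBS doubled total 0 doubled.length
    let cands := (if lo < doubled.length then [doubled.getD lo 0 - total] else []) ++
                 (if 0 < lo then [total - doubled.getD (lo - 1) 0] else [])
    match PySem.List.min? cands (fun x => x) with
    | some v => v
    | none => 0  -- Python min([]) would raise; unreachable (doubled is nonempty)

-- ===== PRECONDITION & SPEC =====
-- Pre_ excludes lists of fewer than two weights: there A (and B) return float('inf'), a float, not an int.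
def Pre_calculate_min_difference (weights : List Int) : Prop := 2 ≤ weights.length
instance (weights : List Int) : Decidable (Pre_calculate_min_difference weights) := by unfold Pre_calculate_min_difference; infer_instance
def pvWitness_calculate_min_difference : List Int := [1, 2]
def Spec_calculate_min_difference (weights : List Int) (out : Int) : Prop := out = calculate_min_difference_alt weights
instance (weights : List Int) (out : Int) : Decidable (Spec_calculate_min_difference weights out) := by unfold Spec_calculate_min_difference; infer_instance

-- ===== CLAIM (what is proved, stated in full; the proofs are below) =====
def Claim_equal_calculate_min_difference : Prop := ∀ (weights : List Int), Dom_calculate_min_difference weights → Pre_calculate_min_difference weights → Spec_calculate_min_difference weights (calculate_min_difference weights)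

-- ===== LEMMAS AND PROOFS =====

def pvPref (s : Int) : List Int → List Int
  | [] => []
  | w :: ws => (s + w) :: pvPref (s + w) ws
theorem pvPref_build (ws : List Int) : ∀ (s : Int) (ps : List Int),
    ws.foldl (fun (acc : Int × List Int) w => (acc.1 + w, acc.2 ++ [2 * (acc.1 + w)])) (s, ps)
      = (s + ws.sum, ps ++ (pvPref s ws).map (fun p => 2 * p)) := by
  induction ws with
  | nil => intro s ps; simp [pvPref]
  | cons w ws ih =>
      intro s ps
      simp only [List.foldl_cons, List.sum_cons, pvPref, ih (s + w) (ps ++ [2 * (s + w)])]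
      simp [add_assoc]
def pvUpd (acc : Option Int) (d : Int) : Option Int :=
  match acc with
  | none => some d
  | some m => if d < m then some d else some m
theorem pvUpd_some (xs : List Int) : ∀ m, xs.foldl pvUpd (some m) = some (xs.foldl min m) := by
  induction xs with
  | nil => intro m; rfl
  | cons x xs ih =>
      intro m
      show List.foldl pvUpd (pvUpd (some m) x) xs = some (List.foldl min (min m x) xs)
      rcases lt_or_ge x m with h | h
      · rw [show pvUpd (some m) x = some x from by simp [pvUpd, h], ih, min_eq_right (le_of_lt h)]
      · rw [show pvUpd (some m) x = some m from by simp [pvUpd, not_lt.mpr h], ih, min_eq_left h]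
def pvStepA (total : Int) (st : Int × Option Int) (w : Int) : Int × Option Int :=
  match st.2 with
  | none => (st.1 + w, some |st.1 + w - (total - (st.1 + w))|)
  | some m =>
      if |st.1 + w - (total - (st.1 + w))| < m then (st.1 + w, some |st.1 + w - (total - (st.1 + w))|)
      else (st.1 + w, some m)

theorem pvA_fold (total : Int) (ys : List Int) : ∀ (s : Int) (m : Option Int),
    (ys.foldl (pvStepA total) (s, m)).2
    = (((pvPref s ys).map (fun p => 2 * p)).map (fun q => |total - q|)).foldl pvUpd m := by
  induction ys with
  | nil => intro s m; simp [pvPref]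
  | cons w ws ih =>
      intro s m
      simp only [List.foldl_cons, pvPref, List.map_cons]
      have habs : |s + w - (total - (s + w))| = |total - 2 * (s + w)| := by
        rw [abs_sub_comm]; ring_nf
      cases m with
      | none => simp only [pvStepA, ih, pvUpd]; rw [habs]
      | some mv =>
          simp only [pvStepA, ih, pvUpd]
          rw [habs]
          split <;> rfl

theorem pvPref_length (ws : List Int) : ∀ s, (pvPref s ws).length = ws.length := by
  induction ws with
  | nil => intro s; rfl
  | cons w ws ih => intro s; simp [pvPref, ih]

theorem pvUpdMin (xs : List Int) : xs.foldl pvUpd none = PySem.List.min? xs (fun x => x) := by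
  cases xs with
  | nil => rfl
  | cons x t =>
      rw [PySem.List.min?_id_cons]
      show List.foldl pvUpd (pvUpd none x) t = some (t.foldl min x)
      exact pvUpd_some t x

theorem pv_min?_eq_of_dominates (xs ys : List Int)
    (h1 : ∀ x ∈ xs, ∃ y ∈ ys, y ≤ x) (h2 : ∀ y ∈ ys, ∃ x ∈ xs, x ≤ y) :
    PySem.List.min? xs (fun x => x) = PySem.List.min? ys (fun x => x) := by
  cases hx : PySem.List.min? xs (fun x => x) with
  | none =>
      rw [PySem.List.min?_eq_none_iff] at hx
      subst hx
      cases hy : PySem.List.min? ys (fun x => x) with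
      | none => rfl
      | some b =>
          obtain ⟨x, hxmem, -⟩ := h2 b (PySem.List.min?_mem hy)
          exact absurd hxmem (List.not_mem_nil)
  | some a =>
      have ha := PySem.List.min?_mem hx
      have hale : ∀ z ∈ xs, a ≤ z := PySem.List.min?_isMin hx
      cases hy : PySem.List.min? ys (fun x => x) with
      | none =>
          rw [PySem.List.min?_eq_none_iff] at hy
          subst hy
          obtain ⟨y, hymem, -⟩ := h1 a ha
          exact absurd hymem (List.not_mem_nil)
      | some b =>
          have hb := PySem.List.min?_mem hy
          have hble : ∀ z ∈ ys, b ≤ z := PySem.List.min?_isMin hy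
          obtain ⟨y, hymem, hyx⟩ := h1 a ha
          obtain ⟨x, hxmem, hxy⟩ := h2 b hb
          have hba : b ≤ a := le_trans (hble y hymem) hyx
          have hab : a ≤ b := le_trans (hale x hxmem) hxy
          rw [le_antisymm hab hba]


theorem pvBS_eq (d : List Int) (t : Int) (lo hi : Nat) :
    pvBS d t lo hi = if lo < hi then
      (if d.getD ((lo + hi) / 2) 0 < t then pvBS d t ((lo + hi) / 2 + 1) hi
       else pvBS d t lo ((lo + hi) / 2))
    else lo := by
  rw [pvBS]

theorem pvBS_spec (d : List Int) (t : Int)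
    (hmono : ∀ p q, p ≤ q → q < d.length → d.getD p 0 ≤ d.getD q 0) :
    ∀ fuel lo hi, hi - lo ≤ fuel → lo ≤ hi → hi ≤ d.length →
    (∀ j, j < lo → d.getD j 0 < t) → (∀ j, hi ≤ j → j < d.length → t ≤ d.getD j 0) →
    lo ≤ pvBS d t lo hi ∧ pvBS d t lo hi ≤ hi ∧
    (∀ j, j < pvBS d t lo hi → d.getD j 0 < t) ∧
    (∀ j, pvBS d t lo hi ≤ j → j < d.length → t ≤ d.getD j 0) := by
  intro fuel
  induction fuel with
  | zero =>
      intro lo hi hf hlh hhl h1 h2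
      have heq : lo = hi := by omega
      rw [pvBS_eq, if_neg (by omega)]
      exact ⟨le_refl _, hlh, h1, by rw [heq]; exact h2⟩
  | succ n ih =>
      intro lo hi hf hlh hhl h1 h2
      by_cases h : lo < hi
      · rw [pvBS_eq, if_pos h]
        by_cases hc : d.getD ((lo + hi) / 2) 0 < t
        · rw [if_pos hc]
          have hres := ih ((lo + hi) / 2 + 1) hi (by omega) (by omega) hhl
            (fun j hj => lt_of_le_of_lt (hmono j ((lo + hi) / 2) (by omega) (by omega)) hc)
            h2
          exact ⟨by omega, hres.2.1, hres.2.2.1, hres.2.2.2⟩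
        · rw [if_neg hc]
          have hres := ih lo ((lo + hi) / 2) (by omega) (by omega) (by omega) h1
            (fun j hjge hjlen => le_trans (not_lt.mp hc) (hmono ((lo + hi) / 2) j hjge hjlen))
          exact ⟨hres.1, by omega, hres.2.2.1, hres.2.2.2⟩
      · rw [pvBS_eq, if_neg h]
        have heq : lo = hi := by omega
        exact ⟨le_refl _, hlh, h1, by rw [heq]; exact h2⟩
theorem pvPerm_min (d q : List Int) (hp : d.Perm q) (f : Int → Int) :
    PySem.List.min? (d.map f) (fun x => x) = PySem.List.min? (q.map f) (fun x => x) := by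
  apply pv_min?_eq_of_dominates
  · intro x hx; exact ⟨x, ((hp.map f).mem_iff).mp hx, le_refl x⟩
  · intro y hy; exact ⟨y, ((hp.map f).mem_iff).mpr hy, le_refl y⟩

theorem pvCands_min (d : List Int) (t : Int) (i : Nat)
    (hmono : ∀ p q, p ≤ q → q < d.length → d.getD p 0 ≤ d.getD q 0)
    (hne : d ≠ []) (hin : i ≤ d.length)
    (hlt : ∀ j, j < i → d.getD j 0 < t)
    (hge : ∀ j, i ≤ j → j < d.length → t ≤ d.getD j 0) :
    PySem.List.min? ((if i < d.length then [d.getD i 0 - t] else []) ++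
                     (if 0 < i then [t - d.getD (i - 1) 0] else [])) (fun x => x)
      = PySem.List.min? (d.map (fun x => |t - x|)) (fun x => x) := by
  have hlen : 0 < d.length := List.length_pos_iff.mpr hne
  apply pv_min?_eq_of_dominates
  · intro x hx
    rcases List.mem_append.mp hx with hx | hx
    · by_cases hi : i < d.length
      · rw [if_pos hi, List.mem_singleton] at hx
        subst hx
        refine ⟨|t - d.getD i 0|, ?_, ?_⟩
        · exact List.mem_map_of_mem (by rw [List.getD_eq_getElem _ _ hi]; exact List.getElem_mem hi)
        · have h1 := hge i (le_refl i) hi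
          rw [abs_sub_comm, abs_of_nonneg (by omega)]
      · rw [if_neg hi] at hx; exact absurd hx (List.not_mem_nil)
    · by_cases hi : 0 < i
      · rw [if_pos hi, List.mem_singleton] at hx
        subst hx
        have him : i - 1 < d.length := by omega
        refine ⟨|t - d.getD (i - 1) 0|, ?_, ?_⟩
        · exact List.mem_map_of_mem (by rw [List.getD_eq_getElem _ _ him]; exact List.getElem_mem him)
        · have h1 := hlt (i - 1) (by omega)
          rw [abs_of_nonneg (by omega)]
      · rw [if_neg hi] at hx; exact absurd hx (List.not_mem_nil)
  · intro y hy
    rcases List.mem_map.mp hy with ⟨x, hxmem, rfl⟩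
    rcases List.mem_iff_getElem.mp hxmem with ⟨j, hj, rfl⟩
    rw [← List.getD_eq_getElem d 0 hj]
    by_cases hji : j < i
    · have hdj := hlt j hji
      have hi0 : 0 < i := by omega
      have him : i - 1 < d.length := by omega
      refine ⟨t - d.getD (i - 1) 0, List.mem_append.mpr (Or.inr ?_), ?_⟩
      · rw [if_pos hi0]; exact List.mem_singleton.mpr rfl
      · have hm := hmono j (i - 1) (by omega) him
        rw [abs_of_nonneg (by omega)]
        omega
    · have hdj := hge j (by omega) hj
      have hiln : i < d.length := by omega
      refine ⟨d.getD i 0 - t, List.mem_append.mpr (Or.inl ?_), ?_⟩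
      · rw [if_pos hiln]; exact List.mem_singleton.mpr rfl
      · have hm := hmono i j (by omega) hj
        rw [abs_sub_comm, abs_of_nonneg (by omega)]
        omega

theorem pvSorted_getD_mono (q : List Int) (p r : Nat) (hpr : p ≤ r)
    (hr : r < (PySem.List.sorted q fun x => x).length) :
    (PySem.List.sorted q fun x => x).getD p 0 ≤ (PySem.List.sorted q fun x => x).getD r 0 := by
  rw [List.getD_eq_getElem _ _ (lt_of_le_of_lt hpr hr), List.getD_eq_getElem _ _ hr]
  exact PySem.List.sorted_id_getElem_mono q hpr hr

theorem pvRange_fold (xs : List Int) {St : Type} (f : St → Int → St) (init : St) :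
    (PySem.List.pyRange 1 (xs.length : Int) 1).foldl
        (fun st t => f st (PySem.List.pyGetD xs (t - 1) 0)) init
      = xs.dropLast.foldl f init := by
  rw [← PySem.List.foldl_pyRange_zero_pyGetD xs.dropLast 0 f init]
  rw [PySem.List.pyRange_one 1 (xs.length : Int), PySem.List.pyRange_one 0]
  rw [List.foldl_map, List.foldl_map]
  have hlen : ((xs.length : Int) - 1).toNat = xs.dropLast.length := by
    simp only [List.length_dropLast]; omega
  have hlen2 : (PySem.List.len xs.dropLast - 0).toNat = xs.dropLast.length := by
    simp [PySem.List.len_eq]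
  rw [hlen, hlen2]
  apply PySem.List.foldl_congr_mem
  intro acc k hk
  have hk' : k < xs.dropLast.length := List.mem_range.mp hk
  congr 1
  have h1 : (1 : Int) + (k : Int) - 1 = ((k : Nat) : Int) := by omega
  have h0 : (0 : Int) + (k : Int) = ((k : Nat) : Int) := by omega
  have hkx : k < xs.length := by
    have := hk'; simp only [List.length_dropLast] at this; omega
  rw [h1, h0, PySem.List.pyGetD_natCast, PySem.List.pyGetD_natCast]
  rw [List.getD_eq_getElem _ _ hk', List.getD_eq_getElem _ _ hkx]
  simp [List.getElem_dropLast]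

-- the B-side tail: binary search + two candidates compute the min over the mapped sorted list
theorem pvBside (t : Int) (q : List Int) (hne : q ≠ []) :
    PySem.List.min?
      ((if pvBS (PySem.List.sorted q fun x => x) t 0 (PySem.List.sorted q fun x => x).length <
            (PySem.List.sorted q fun x => x).length
        then [(PySem.List.sorted q fun x => x).getD
                (pvBS (PySem.List.sorted q fun x => x) t 0 (PySem.List.sorted q fun x => x).length) 0 - t]
        else []) ++
       (if 0 < pvBS (PySem.List.sorted q fun x => x) t 0 (PySem.List.sorted q fun x => x).length
        then [t - (PySem.List.sorted q fun x => x).getD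
                (pvBS (PySem.List.sorted q fun x => x) t 0 (PySem.List.sorted q fun x => x).length - 1) 0]
        else []))
      (fun x => x)
    = PySem.List.min? (q.map fun x => |t - x|) (fun x => x) := by
  have hperm := PySem.List.sorted_perm q (fun x => x) false
  have hmono' := pvSorted_getD_mono q
  have hdlen : (PySem.List.sorted q fun x => x).length = q.length :=
    PySem.List.length_sorted q _ _
  generalize hd : PySem.List.sorted q (fun x => x) = d at *
  have hdne : d ≠ [] := by
    intro h; rw [h] at hdlen; exact hne (List.length_eq_zero_iff.mp hdlen.symm)
  obtain ⟨-, hile, hlt, hge⟩ := pvBS_spec d t hmono' d.length 0 d.length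
    (by omega) (by omega) (le_refl _)
    (fun j hj => absurd hj (Nat.not_lt_zero j))
    (fun j h1 h2 => absurd h1 (by omega))
  rw [pvCands_min d t _ hmono' hdne hile hlt hge]
  exact pvPerm_min d q hperm _

-- ===== VERDICT (by name: the statement is the Claim_ definition above) =====
theorem calculate_min_difference_spec : Claim_equal_calculate_min_difference := by
  intro weights _ hpre
  unfold Pre_calculate_min_difference at hpre
  unfold Spec_calculate_min_difference calculate_min_difference calculate_min_difference_alt
  simp only []
  have hfun : (fun (st : Int × Option Int) (t : Int) =>
      match st.2 with
      | none => (st.1 + PySem.List.pyGetD weights (t - 1) 0,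
          some |st.1 + PySem.List.pyGetD weights (t - 1) 0 -
            (weights.sum - (st.1 + PySem.List.pyGetD weights (t - 1) 0))|)
      | some m =>
          if |st.1 + PySem.List.pyGetD weights (t - 1) 0 -
                (weights.sum - (st.1 + PySem.List.pyGetD weights (t - 1) 0))| < m then
            (st.1 + PySem.List.pyGetD weights (t - 1) 0,
              some |st.1 + PySem.List.pyGetD weights (t - 1) 0 -
                (weights.sum - (st.1 + PySem.List.pyGetD weights (t - 1) 0))|)
          else (st.1 + PySem.List.pyGetD weights (t - 1) 0, some m))
      = fun (st : Int × Option Int) (t : Int) =>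
          pvStepA weights.sum st (PySem.List.pyGetD weights (t - 1) 0) := rfl
  rw [hfun, pvRange_fold weights (pvStepA weights.sum) ((0 : Int), (none : Option Int))]
  rw [pvA_fold weights.sum weights.dropLast 0 none, pvUpdMin, List.map_map]
  rw [if_neg (by omega)]
  rw [PySem.List.slice_to_neg_one, pvPref_build weights.dropLast 0 []]
  simp only [List.nil_append]
  have hne : (pvPref 0 weights.dropLast).map (fun p => 2 * p) ≠ [] := by
    intro h
    have := congrArg List.length h
    rw [List.length_map, pvPref_length] at this
    simp only [List.length_dropLast, List.length_nil] at this
    omega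
  rw [pvBside weights.sum ((pvPref 0 weights.dropLast).map (fun p => 2 * p)) hne]
  rw [List.map_map]
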